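-- pv_equiv track=rewrite | github.com/erikpe/niflheim | compiler/backend/analysis/simplify_cfg.py | _resolve_forward_target
-- ===== SOURCE A (Python) =====
-- def _resolve_forward_target(block_id, raw_candidates):
--     visited = set()
--     current_block_id = block_id
--     while current_block_id in raw_candidates:
--         if current_block_id in visited:
--             return None
--         visited.add(current_block_id)
--         next_block_id = raw_candidates[current_block_id]
--         if next_block_id == current_block_id:
--             return None
--         current_block_id = next_block_id
--     return current_block_id
-- ===== SOURCE B (Python) =====
-- def _resolve_forward_target(block_id, raw_candidates):
--     remaining = dict(raw_candidates)
--     cur = block_id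
--     while cur in remaining:
--         cur = remaining.pop(cur)
--     return None if cur in raw_candidates else cur
-- ===== Notes on version B (the rewrite author's own statement) =====
-- stated objective: simpler
-- what changed: Instead of a growing visited set plus an explicit self-loop check, B pops each traversed key from a shrinking copy of the dict (a revisited or self-looping node is simply no longer a key, so the walk stops by itself) and one final membership test against the original dict distinguishes a genuine exit from a cycle.
import Mathlib
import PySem

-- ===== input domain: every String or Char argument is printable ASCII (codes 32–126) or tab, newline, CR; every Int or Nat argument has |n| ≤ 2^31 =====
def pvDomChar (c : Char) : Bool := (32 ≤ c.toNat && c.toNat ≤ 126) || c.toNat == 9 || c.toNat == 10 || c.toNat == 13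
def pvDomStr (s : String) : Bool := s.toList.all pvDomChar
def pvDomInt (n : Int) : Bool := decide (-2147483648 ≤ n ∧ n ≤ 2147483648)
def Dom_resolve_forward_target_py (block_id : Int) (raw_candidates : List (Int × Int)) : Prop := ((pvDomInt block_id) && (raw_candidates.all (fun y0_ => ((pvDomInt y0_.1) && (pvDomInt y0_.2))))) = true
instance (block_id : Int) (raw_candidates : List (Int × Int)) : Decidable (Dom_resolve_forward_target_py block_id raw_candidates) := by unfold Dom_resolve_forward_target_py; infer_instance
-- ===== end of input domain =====

-- A follows the jump chain with a visited set and an explicit self-loop check; B pops each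
-- traversed key from a shrinking copy of the dict (a revisited node is no longer a key, so the
-- walk stops by itself) and tests the stopping node against the original dict: simpler.


-- ===== PORT A =====
-- A's while loop as fuel recursion; fuel (length+1) is a pure totality guard (each iteration
-- visits a fresh key, so the 0-fuel branch is unreachable on the loop's actual runs).
def pvALoop (d : PySem.Dict Int Int) : Nat → PySem.Set Int → Int → Option Int
  | 0, _, _ => none
  | fuel + 1, visited, c =>
    match d.get? c with                      -- 'c in raw_candidates' + 'raw_candidates[c]'
    | none => some c
    | some n =>
      if PySem.Set.contains visited c then none
      else if n = c then none
      else pvALoop d fuel (PySem.Set.add visited c) n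

def resolve_forward_target_py (block_id : Int) (raw_candidates : List (Int × Int)) : Option Int :=
  pvALoop (PySem.Dict.mk raw_candidates) (raw_candidates.length + 1) PySem.Set.empty block_id

-- ===== PORT B =====
-- termination lemma for B's loop: a successful pop strictly shrinks the dict
theorem pvPopSize (rem : PySem.Dict Int Int) (c : Int) (n : Int) (rem' : PySem.Dict Int Int)
    (h : rem.pop? c = some (n, rem')) : rem'.size < rem.size := by
  cases hg : rem.get? c with
  | none => simp [PySem.Dict.pop?, hg] at h
  | some m =>
    have hrem' : rem' = rem.erase c := by
      simp only [PySem.Dict.pop?, hg, Option.map_some, Option.some.injEq, Prod.mk.injEq] at h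
      exact h.2.symm
    subst hrem'
    simp only [PySem.Dict.get?, Option.map_eq_some_iff] at hg
    obtain ⟨q, hq, -⟩ := hg
    have hqmem := List.mem_of_find?_eq_some hq
    have hqc := List.find?_some hq
    simp only [PySem.Dict.size, PySem.Dict.erase]
    exact List.length_filter_lt_length_iff_exists.mpr ⟨q, hqmem, by simp [hqc]⟩

-- B's while loop: 'cur in remaining' + 'remaining.pop(cur)' is Dict.pop?; the final
-- 'cur in raw_candidates' is the get?-isSome test on the original dict.
def pvBChase (orig : PySem.Dict Int Int) (rem : PySem.Dict Int Int) (cur : Int) : Option Int :=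
  match h : rem.pop? cur with
  | some (nxt, rem') => pvBChase orig rem' nxt
  | none => if (orig.get? cur).isSome then none else some cur
termination_by rem.size
decreasing_by exact pvPopSize rem cur nxt rem' h

def resolve_forward_target_py_alt (block_id : Int) (raw_candidates : List (Int × Int)) : Option Int :=
  pvBChase (PySem.Dict.mk raw_candidates) (PySem.Dict.mk raw_candidates) block_id

-- ===== PRECONDITION & SPEC =====
def Spec_resolve_forward_target_py (block_id : Int) (raw_candidates : List (Int × Int)) (out : Option Int) : Prop := out = resolve_forward_target_py_alt block_id raw_candidates
instance (block_id : Int) (raw_candidates : List (Int × Int)) (out : Option Int) : Decidable (Spec_resolve_forward_target_py block_id raw_candidates out) := by unfold Spec_resolve_forward_target_py; infer_instance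

-- ===== CLAIM (what is proved, stated in full; the proofs are below) =====
def Claim_equal_resolve_forward_target_py : Prop := ∀ (block_id : Int) (raw_candidates : List (Int × Int)), Dom_resolve_forward_target_py block_id raw_candidates → Spec_resolve_forward_target_py block_id raw_candidates (resolve_forward_target_py block_id raw_candidates)

-- ===== LEMMAS AND PROOFS =====

theorem pvGetErase (d : PySem.Dict Int Int) (c x : Int) :
    (d.erase c).get? x = if x = c then none else d.get? x := by
  obtain ⟨l⟩ := d
  simp only [PySem.Dict.erase, PySem.Dict.get?]
  by_cases hx : x = c
  · subst hx
    rw [if_pos rfl, List.find?_eq_none.mpr]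
    · rfl
    · intro p hp
      have := (List.mem_filter.mp hp).2
      simp at this ⊢
      exact this
  · rw [if_neg hx]
    induction l with
    | nil => rfl
    | cons p t ih =>
      by_cases hp : p.1 = c
      · rw [List.filter_cons_of_neg (by simp [hp]),
            List.find?_cons_of_neg (by simp [hp]; exact fun h => hx h.symm)]
        · exact ih
      · rw [List.filter_cons_of_pos (by simp [hp])]
        by_cases hpx : p.1 = x
        · rw [List.find?_cons_of_pos (by simp [hpx]), List.find?_cons_of_pos (by simp [hpx])]
        · rw [List.find?_cons_of_neg (by simp [hpx]), List.find?_cons_of_neg (by simp [hpx])]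
          exact ih

theorem pvPopNone (rem : PySem.Dict Int Int) (c : Int) (h : rem.get? c = none) :
    rem.pop? c = none := by
  unfold PySem.Dict.pop?; rw [h]; rfl

theorem pvPopSome (rem : PySem.Dict Int Int) (c n : Int) (h : rem.get? c = some n) :
    rem.pop? c = some (n, rem.erase c) := by
  unfold PySem.Dict.pop?; rw [h]; rfl

theorem pvSetContains_add (v : PySem.Set Int) (c x : Int) :
    PySem.Set.contains (PySem.Set.add v c) x = true ↔ x = c ∨ PySem.Set.contains v x = true := by
  simp [PySem.Set.contains, PySem.Set.mem_add, or_comm]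

theorem pvBChase_pop_none (orig rem : PySem.Dict Int Int) (c : Int)
    (h : rem.pop? c = none) :
    pvBChase orig rem c = if (orig.get? c).isSome then none else some c := by
  rw [pvBChase]
  split
  next nxt rem' heq => rw [h] at heq; cases heq
  next heq => rfl

theorem pvBChase_pop_some (orig rem : PySem.Dict Int Int) (c n : Int) (rem' : PySem.Dict Int Int)
    (h : rem.pop? c = some (n, rem')) :
    pvBChase orig rem c = pvBChase orig rem' n := by
  rw [pvBChase]
  split
  next nxt rem'' heq =>
    rw [h] at heq
    simp only [Option.some.injEq, Prod.mk.injEq] at heq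
    rw [← heq.1, ← heq.2]
  next heq => rw [h] at heq; cases heq

theorem pvALoop_succ_none (d : PySem.Dict Int Int) (k : Nat) (v : PySem.Set Int) (c : Int)
    (hd : d.get? c = none) : pvALoop d (k + 1) v c = some c := by
  show (match d.get? c with
    | none => some c
    | some n => if PySem.Set.contains v c then none
        else if n = c then none else pvALoop d k (PySem.Set.add v c) n) = some c
  rw [hd]

theorem pvALoop_succ_some (d : PySem.Dict Int Int) (k : Nat) (v : PySem.Set Int) (c n : Int)
    (hd : d.get? c = some n) :
    pvALoop d (k + 1) v c = if PySem.Set.contains v c then none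
        else if n = c then none else pvALoop d k (PySem.Set.add v c) n := by
  show (match d.get? c with
    | none => some c
    | some n => if PySem.Set.contains v c then none
        else if n = c then none else pvALoop d k (PySem.Set.add v c) n) = _
  rw [hd]

-- the crux: B's shrinking dict equals 'orig minus A's visited set' at every step
theorem pvMain (orig : PySem.Dict Int Int) (fuel : Nat) :
    ∀ (rem : PySem.Dict Int Int) (v : PySem.Set Int) (c : Int),
      (∀ x, rem.get? x = if PySem.Set.contains v x then none else orig.get? x) →
      rem.size < fuel →
      pvALoop orig fuel v c = pvBChase orig rem c := by
  induction fuel with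
  | zero => intro _ _ _ _ h; omega
  | succ k ih =>
    intro rem v c hinv hsz
    cases ho : orig.get? c with
    | none =>
      have hrc : rem.get? c = none := by rw [hinv c]; split <;> simp [ho]
      rw [pvALoop_succ_none orig k v c ho,
          pvBChase_pop_none orig rem c (pvPopNone rem c hrc), ho]
      simp
    | some n =>
      rw [pvALoop_succ_some orig k v c n ho]
      cases hvc : PySem.Set.contains v c with
      | true =>
        have hrc : rem.get? c = none := by rw [hinv c, hvc]; simp
        rw [pvBChase_pop_none orig rem c (pvPopNone rem c hrc), ho]
        simp
      | false =>
        have hrc : rem.get? c = some n := by rw [hinv c, hvc]; simp [ho]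
        have hpop := pvPopSome rem c n hrc
        rw [pvBChase_pop_some orig rem c n (rem.erase c) hpop]
        have hsz' : (rem.erase c).size < rem.size := pvPopSize rem c n (rem.erase c) hpop
        by_cases hn : n = c
        · have hne : (rem.erase c).get? n = none := by rw [pvGetErase]; simp [hn]
          rw [pvBChase_pop_none orig (rem.erase c) n (pvPopNone _ n hne), hn, ho]
          simp
        · have hinv' : ∀ x, (rem.erase c).get? x =
              if PySem.Set.contains (PySem.Set.add v c) x then none else orig.get? x := by
            intro x
            rw [pvGetErase, hinv x]
            by_cases hx : x = c
            · have ht : PySem.Set.contains (PySem.Set.add v c) x = true :=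
                (pvSetContains_add v c x).mpr (Or.inl hx)
              rw [if_pos hx, ht]; rfl
            · rw [if_neg hx]
              cases hvx : PySem.Set.contains v x with
              | true =>
                have ht : PySem.Set.contains (PySem.Set.add v c) x = true :=
                  (pvSetContains_add v c x).mpr (Or.inr hvx)
                rw [ht]
              | false =>
                have hf : PySem.Set.contains (PySem.Set.add v c) x = false := by
                  cases hc : PySem.Set.contains (PySem.Set.add v c) x
                  · rfl
                  · rcases (pvSetContains_add v c x).mp hc with h | h
                    · exact absurd h hx
                    · rw [hvx] at h; exact absurd h (by simp)
                rw [hf]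
          rw [← ih (rem.erase c) (PySem.Set.add v c) n hinv' (by omega)]
          simp [hn]

-- ===== VERDICT (by name: the statement is the Claim_ definition above) =====
theorem resolve_forward_target_py_spec : Claim_equal_resolve_forward_target_py := by
  intro block_id raw_candidates _
  unfold Spec_resolve_forward_target_py resolve_forward_target_py resolve_forward_target_py_alt
  exact pvMain (PySem.Dict.mk raw_candidates) (raw_candidates.length + 1)
    (PySem.Dict.mk raw_candidates) PySem.Set.empty block_id
    (by intro x; rw [show PySem.Set.contains PySem.Set.empty x = false from rfl]; simp)
    (by show raw_candidates.length < raw_candidates.length + 1; omega)
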